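-- pv_equiv track=rewrite | github.com/CKCHDX/klar | lab/engine/search_engine.py | filter_relevant_links
-- ===== SOURCE A (Python) =====
-- from typing import List, Dict, Set, Tuple
--
-- def filter_relevant_links(links: List[str], query: str) -> List[str]:
--     """Filter links that might contain query terms"""
--     query_terms = set(query.lower().split())
--     scored_links = []
--     for link in links:
--         url_lower = link.lower()
--         score = 0
--         for term in query_terms:
--             if term in url_lower:
--                 score += 2
--         if '?' not in link:
--             score += 1
--         path_depth = url_lower.count('/')
--         if 3 <= path_depth <= 5:
--             score += 1
--         if score > 0:
--             scored_links.append((score, link))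
--
--     scored_links.sort(reverse=True, key=lambda x: x[0])
--     return [link for score, link in scored_links]
-- ===== SOURCE B (Python) =====
-- def filter_relevant_links(links, query):
--     """Filter links that might contain query terms (bucket sort by score)."""
--     terms = set(query.lower().split())
--     max_score = 2 * len(terms) + 2
--     buckets = [[] for _ in range(max_score + 1)]
--     for link in links:
--         low = link.lower()
--         score = 2 * sum(1 for t in terms if t in low)
--         if '?' not in link:
--             score += 1
--         depth = low.count('/')
--         if 3 <= depth <= 5:
--             score += 1
--         if score > 0:
--             buckets[score].append(link)
--     out = []
--     for s in range(max_score, 0, -1):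
--         out.extend(buckets[s])
--     return out
-- ===== Notes on version B (the rewrite author's own statement) =====
-- stated objective: alternative
-- what changed: Replaces collecting (score, link) pairs and a stable comparison sort with a counting/bucket sort: links are appended to score-indexed buckets in input order and the buckets are emitted from the highest score down, which reproduces the stable tie order without any comparison sort.
import Mathlib
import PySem

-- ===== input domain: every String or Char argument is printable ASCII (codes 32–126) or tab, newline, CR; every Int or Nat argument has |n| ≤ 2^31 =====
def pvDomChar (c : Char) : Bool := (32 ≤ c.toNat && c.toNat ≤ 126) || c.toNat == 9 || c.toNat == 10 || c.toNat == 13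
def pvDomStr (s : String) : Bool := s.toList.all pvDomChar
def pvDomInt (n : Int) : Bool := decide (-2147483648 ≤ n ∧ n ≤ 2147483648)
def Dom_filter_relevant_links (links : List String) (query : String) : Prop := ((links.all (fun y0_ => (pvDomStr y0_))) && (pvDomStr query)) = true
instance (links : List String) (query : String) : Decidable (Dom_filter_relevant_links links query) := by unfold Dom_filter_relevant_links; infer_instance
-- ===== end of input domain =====

-- B replaces A's collect-then-comparison-sort with a stable counting/bucket sort over score-indexed buckets (alternative decomposition, same results).


-- ===== PORT A =====
def filter_relevant_links (links : List String) (query : String) : List String :=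
  let query_terms : PySem.Set String := PySem.Set.ofList (PySem.Str.split₀ (PySem.Str.lower query))
  let scored_links : List (Int × String) :=
    links.foldl (fun acc link =>
      let url_lower := PySem.Str.lower link
      let score : Int := query_terms.foldl (fun s term => if PySem.Str.isIn term url_lower then s + 2 else s) 0
      let score : Int := if !(PySem.Str.isIn "?" link) then score + 1 else score
      let path_depth := PySem.Str.count url_lower "/"
      let score : Int := if 3 ≤ path_depth ∧ path_depth ≤ 5 then score + 1 else score
      if 0 < score then acc ++ [(score, link)] else acc) []
  (PySem.List.sorted scored_links (fun x => x.1) true).map (fun x => x.2)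

-- ===== PORT B =====
def filter_relevant_links_alt (links : List String) (query : String) : List String :=
  let terms : PySem.Set String := PySem.Set.ofList (PySem.Str.split₀ (PySem.Str.lower query))
  let max_score : Int := 2 * (terms.length : Int) + 2
  let buckets : List (List String) := List.replicate (max_score.toNat + 1) []
  let buckets : List (List String) :=
    links.foldl (fun buckets link =>
      let low := PySem.Str.lower link
      let score : Int := 2 * ((terms.countP (fun t => PySem.Str.isIn t low) : Nat) : Int)
      let score : Int := if !(PySem.Str.isIn "?" link) then score + 1 else score
      let depth := PySem.Str.count low "/"
      let score : Int := if 3 ≤ depth ∧ depth ≤ 5 then score + 1 else score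
      if 0 < score then buckets.set score.toNat ((buckets.getD score.toNat []) ++ [link]) else buckets) buckets
  (PySem.List.pyRange max_score 0 (-1)).foldl (fun out s => out ++ buckets.getD s.toNat []) []

-- ===== PRECONDITION & SPEC =====
def Spec_filter_relevant_links (links : List String) (query : String) (out : List String) : Prop := out = filter_relevant_links_alt links query
instance (links : List String) (query : String) (out : List String) : Decidable (Spec_filter_relevant_links links query out) := by unfold Spec_filter_relevant_links; infer_instance

-- ===== CLAIM (what is proved, stated in full; the proofs are below) =====
def Claim_equal_filter_relevant_links : Prop := ∀ (links : List String) (query : String), Dom_filter_relevant_links links query → Spec_filter_relevant_links links query (filter_relevant_links links query)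

-- ===== LEMMAS AND PROOFS =====

-- the common score of a link, given the deduplicated query terms
def pvScore (terms : List String) (link : String) : Int :=
  let low := PySem.Str.lower link
  let score : Int := 2 * ((terms.countP (fun t => PySem.Str.isIn t low) : Nat) : Int)
  let score : Int := if !(PySem.Str.isIn "?" link) then score + 1 else score
  let depth := PySem.Str.count low "/"
  if 3 ≤ depth ∧ depth ≤ 5 then score + 1 else score

lemma pvScore_nonneg (terms : List String) (link : String) : 0 ≤ pvScore terms link := by
  unfold pvScore
  have : (0:Int) ≤ 2 * ((terms.countP (fun t => PySem.Str.isIn t (PySem.Str.lower link)) : Nat) : Int) := by positivity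
  dsimp only
  split_ifs
  all_goals omega

lemma pvScore_le (terms : List String) (link : String) :
    pvScore terms link ≤ 2 * (terms.length : Int) + 2 := by
  unfold pvScore
  have h := List.countP_le_length (l := terms) (p := fun t => PySem.Str.isIn t (PySem.Str.lower link))
  have h' : ((terms.countP (fun t => PySem.Str.isIn t (PySem.Str.lower link)) : Nat) : Int) ≤ (terms.length : Int) := by exact_mod_cast h
  dsimp only
  split_ifs
  all_goals omega

-- A's inner +2 loop is twice the count
lemma foldl_two_eq_countP (l : List String) (p : String → Bool) : ∀ (a : Int),
    l.foldl (fun s t => if p t then s + 2 else s) a = a + 2 * ((l.countP p : Nat) : Int) := by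
  induction l with
  | nil => intro a; simp
  | cons x xs ih =>
    intro a
    simp only [List.foldl_cons, List.countP_cons, ih]
    by_cases h : p x
    · simp [h]; ring
    · simp [h]

-- A's collecting loop is a filter-map
lemma A_step (terms : List String) (acc : List (Int × String)) (link : String) :
    (let url_lower := PySem.Str.lower link
     let score : Int := terms.foldl (fun s term => if PySem.Str.isIn term url_lower then s + 2 else s) 0
     let score : Int := if !(PySem.Str.isIn "?" link) then score + 1 else score
     let path_depth := PySem.Str.count url_lower "/"
     let score : Int := if 3 ≤ path_depth ∧ path_depth ≤ 5 then score + 1 else score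
     if 0 < score then acc ++ [(score, link)] else acc)
    = if 0 < pvScore terms link then acc ++ [(pvScore terms link, link)] else acc := by
  dsimp only
  rw [foldl_two_eq_countP]
  unfold pvScore
  dsimp only
  rw [Int.zero_add]

lemma A_fold (terms : List String) (links : List String) : ∀ (acc : List (Int × String)),
    links.foldl (fun acc link =>
      let url_lower := PySem.Str.lower link
      let score : Int := terms.foldl (fun s term => if PySem.Str.isIn term url_lower then s + 2 else s) 0
      let score : Int := if !(PySem.Str.isIn "?" link) then score + 1 else score
      let path_depth := PySem.Str.count url_lower "/"
      let score : Int := if 3 ≤ path_depth ∧ path_depth ≤ 5 then score + 1 else score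
      if 0 < score then acc ++ [(score, link)] else acc) acc
    = acc ++ (links.filter (fun l => decide (0 < pvScore terms l))).map (fun l => (pvScore terms l, l)) := by
  induction links with
  | nil => intro acc; simp
  | cons x xs ih =>
    intro acc
    simp only [List.foldl_cons, List.filter_cons]
    rw [A_step]
    by_cases h : 0 < pvScore terms x
    · rw [if_pos h, ih]
      simp only [decide_eq_true h, if_true, List.map_cons, List.cons_append,
        List.append_assoc, List.nil_append]
    · rw [if_neg h, ih]
      simp only [decide_eq_false h, Bool.false_eq_true, if_false]

-- buckets.set step turns a mapped range into a mapped range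
lemma set_map_range (n t : Nat) (g : Nat → List String) (v : List String) (_ht : t < n) :
    ((List.range n).map g).set t (g t ++ v)
      = (List.range n).map (fun s => g s ++ if s = t then v else []) := by
  apply List.ext_getElem
  · simp
  · intro i h1 h2
    simp only [List.getElem_set, List.getElem_map, List.getElem_range] at *
    by_cases hit : i = t
    · simp [hit]
    · simp only [if_neg hit]
      rw [if_neg (fun h : t = i => hit h.symm)]
      simp

lemma getD_map_range' (n t : Nat) (g : Nat → List String) (ht : t < n) :
    ((List.range n).map g).getD t [] = g t := by
  simp [List.getD, ht]

-- invariant of B's bucket-filling loop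
lemma B_step (terms : List String) (buckets : List (List String)) (link : String) :
    (let low := PySem.Str.lower link
     let score : Int := 2 * ((terms.countP (fun t => PySem.Str.isIn t low) : Nat) : Int)
     let score : Int := if !(PySem.Str.isIn "?" link) then score + 1 else score
     let depth := PySem.Str.count low "/"
     let score : Int := if 3 ≤ depth ∧ depth ≤ 5 then score + 1 else score
     if 0 < score then buckets.set score.toNat ((buckets.getD score.toNat []) ++ [link]) else buckets)
    = if 0 < pvScore terms link then
        buckets.set (pvScore terms link).toNat ((buckets.getD (pvScore terms link).toNat []) ++ [link])
      else buckets := rfl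

lemma B_fold (terms : List String) (n : Nat)
    (hn : ∀ l : String, (pvScore terms l).toNat < n) (links : List String) :
    ∀ (g : Nat → List String),
    links.foldl (fun buckets link =>
      let low := PySem.Str.lower link
      let score : Int := 2 * ((terms.countP (fun t => PySem.Str.isIn t low) : Nat) : Int)
      let score : Int := if !(PySem.Str.isIn "?" link) then score + 1 else score
      let depth := PySem.Str.count low "/"
      let score : Int := if 3 ≤ depth ∧ depth ≤ 5 then score + 1 else score
      if 0 < score then buckets.set score.toNat ((buckets.getD score.toNat []) ++ [link]) else buckets)
      ((List.range n).map g)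
    = (List.range n).map (fun s => g s ++ (links.filter (fun l => decide (0 < pvScore terms l) && decide ((pvScore terms l).toNat = s)))) := by
  induction links with
  | nil => intro g; simp
  | cons x xs ih =>
    intro g
    simp only [List.foldl_cons, List.filter_cons]
    rw [B_step]
    by_cases h : 0 < pvScore terms x
    · rw [if_pos h, getD_map_range' n _ g (hn x), set_map_range n _ g _ (hn x), ih]
      apply List.map_congr_left
      intro s hs
      by_cases hst : (pvScore terms x).toNat = s
      · simp [hst, h]
      · simp [hst, h]
        exact fun hc : s = (pvScore terms x).toNat => hst hc.symm
    · rw [if_neg h, ih]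
      apply List.map_congr_left
      intro s hs
      simp [h]

-- insertBy into strictly-descending buckets appends at the end of x's bucket
lemma insertBy_append_not_before (before : (Int × String) → (Int × String) → Bool) (x : Int × String)
    (as bs : List (Int × String)) (h : ∀ a ∈ as, before x a = false) :
    PySem.List.insertBy before x (as ++ bs) = as ++ PySem.List.insertBy before x bs := by
  induction as with
  | nil => simp
  | cons a as ih =>
    simp only [List.cons_append, PySem.List.insertBy, h a (by simp)]
    simp only [Bool.false_eq_true, if_false, List.cons.injEq, true_and]
    exact ih (fun a ha => h a (by simp [ha]))

lemma insertBy_all_before (before : (Int × String) → (Int × String) → Bool) (x : Int × String)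
    (bs : List (Int × String)) (h : ∀ b ∈ bs, before x b = true) :
    PySem.List.insertBy before x bs = x :: bs := by
  cases bs with
  | nil => rfl
  | cons b bs => simp [PySem.List.insertBy, h b (by simp)]

lemma insertBy_buckets (ss : List Int) (hss : ss.Pairwise (fun a b => b < a))
    (f : Int → List (Int × String)) (hf : ∀ s ∈ ss, ∀ p ∈ f s, p.1 = s)
    (x : Int × String) (hx : x.1 ∈ ss) :
    PySem.List.insertBy (fun a b => decide (b.1 < a.1)) x (ss.flatMap f)
      = ss.flatMap (fun s => f s ++ if s = x.1 then [x] else []) := by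
  induction ss with
  | nil => simp at hx
  | cons s rest ih =>
    have hrest : ∀ s' ∈ rest, s' < s := fun s' h' => (List.pairwise_cons.mp hss).1 s' h'
    by_cases hxs : x.1 = s
    · have hnotrest : ∀ s' ∈ rest, ¬ (s' = x.1) := fun s' h' heq => by
        have := hrest s' h'; omega
      have h1 : ∀ a ∈ f s, (fun a b => decide (b.1 < a.1)) x a = false := by
        intro a ha
        have := hf s (by simp) a ha
        simp [this, hxs]
      have h2 : ∀ b ∈ rest.flatMap f, (fun a b => decide (b.1 < a.1)) x b = true := by
        intro b hb
        obtain ⟨s', hs', hbs'⟩ := List.mem_flatMap.mp hb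
        have := hf s' (by simp [hs']) b hbs'
        have := hrest s' hs'
        simp; omega
      rw [List.flatMap_cons,
        insertBy_append_not_before (fun a b => decide (b.1 < a.1)) x (f s) (rest.flatMap f) h1,
        insertBy_all_before (fun a b => decide (b.1 < a.1)) x (rest.flatMap f) h2,
        List.flatMap_cons, if_pos hxs.symm]
      have hrw : rest.flatMap (fun s' => f s' ++ if s' = x.1 then [x] else []) = rest.flatMap f := by
        apply List.flatMap_congr
        intro s' hs'
        simp [hnotrest s' hs']
      rw [hrw]
      simp
    · have hxrest : x.1 ∈ rest := by
        rcases List.mem_cons.mp hx with h | h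
        · omega
        · exact h
      have h1 : ∀ a ∈ f s, (fun a b => decide (b.1 < a.1)) x a = false := by
        intro a ha
        have hka := hf s (by simp) a ha
        have := hrest x.1 hxrest
        simp [hka]; omega
      rw [List.flatMap_cons,
        insertBy_append_not_before (fun a b => decide (b.1 < a.1)) x (f s) (rest.flatMap f) h1]
      rw [ih (List.pairwise_cons.mp hss).2 (fun s' h' => hf s' (by simp [h'])) hxrest]
      simp [Ne.symm hxs]

-- stable reverse sort of a list whose keys all lie in a strictly-descending list = bucket concatenation
lemma sorted_eq_buckets (ss : List Int) (hss : ss.Pairwise (fun a b => b < a)) :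
    ∀ (l : List (Int × String)), (∀ p ∈ l, p.1 ∈ ss) →
    PySem.List.sorted l (fun x => x.1) true = ss.flatMap (fun s => l.filter (fun p => decide (p.1 = s))) := by
  intro l
  induction l using List.reverseRecOn with
  | nil => simp [PySem.List.sorted]
  | append_singleton l x ih =>
    intro h
    rw [PySem.List.sorted_rev_eq_foldl_insertBy, List.foldl_append]
    simp only [List.foldl_cons, List.foldl_nil]
    rw [← PySem.List.sorted_rev_eq_foldl_insertBy]
    rw [ih (fun p hp => h p (by simp [hp]))]
    rw [insertBy_buckets ss hss _ (fun s _ p hp => by simpa using (List.mem_filter.mp hp).2) x (h x (by simp))]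
    apply List.flatMap_congr
    intro s hs
    rw [List.filter_append]
    congr 1
    by_cases hxs : x.1 = s
    · simp [hxs]
    · rw [if_neg (fun h : s = x.1 => hxs h.symm)]
      simp only [List.filter_cons, List.filter_nil]
      rw [if_neg (by simpa using hxs)]

-- the descending range is [M, M-1, ..., 1]
lemma pyRange_desc (M : Int) (hM : 0 ≤ M) :
    PySem.List.pyRange M 0 (-1) = (List.range M.toNat).map (fun k : Nat => M - (k:Int)) := by
  by_cases h : 0 < M
  · simp only [PySem.List.pyRange]
    rw [if_neg (by norm_num), if_neg (by norm_num), if_pos (by simpa using h)]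
    have : ((M - 0 + -(-1) - 1) / -(-1)).toNat = M.toNat := by norm_num
    rw [this]
    apply List.map_congr_left
    intro k _
    ring
  · have hM0 : M = 0 := by omega
    subst hM0
    rfl


-- ===== VERDICT (by name: the statement is the Claim_ definition above) =====
set_option maxHeartbeats 1000000 in
theorem filter_relevant_links_spec : Claim_equal_filter_relevant_links := by
  intro links query _
  unfold Spec_filter_relevant_links filter_relevant_links filter_relevant_links_alt
  dsimp only
  set terms : List String := PySem.Set.ofList (PySem.Str.split₀ (PySem.Str.lower query)) with hterms
  set M : Int := 2 * (terms.length : Int) + 2 with hM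
  have hM0 : (0:Int) ≤ M := by rw [hM]; omega
  have hMnat : M.toNat = 2 * terms.length + 2 := by rw [hM]; omega
  have hnlt : ∀ l : String, (pvScore terms l).toNat < M.toNat + 1 := by
    intro l
    have h1 := pvScore_le terms l
    have h2 := pvScore_nonneg terms l
    rw [← hM] at h1
    omega
  have hrep : List.replicate (M.toNat + 1) ([] : List String)
      = (List.range (M.toNat + 1)).map (fun _ => ([] : List String)) := by
    simp [List.map_const']
  rw [A_fold terms links [], hrep, B_fold terms (M.toNat + 1) hnlt links,
    PySem.List.foldl_append_eq_flatMap, List.nil_append, List.nil_append]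
  have hss : PySem.List.pyRange M 0 (-1) = (List.range M.toNat).map (fun k : Nat => M - (k:Int)) :=
    pyRange_desc M hM0
  have hpair : (PySem.List.pyRange M 0 (-1)).Pairwise (fun a b => b < a) := by
    rw [hss, List.pairwise_map]
    exact List.pairwise_lt_range.imp (fun h => by omega)
  have hbounds : ∀ s ∈ PySem.List.pyRange M 0 (-1), 1 ≤ s ∧ s ≤ M := by
    intro s hsmem
    rw [hss] at hsmem
    obtain ⟨k, hk, hks⟩ := List.mem_map.mp hsmem
    have := List.mem_range.mp hk
    omega
  have hmem : ∀ p ∈ (links.filter (fun l => decide (0 < pvScore terms l))).map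
      (fun l => (pvScore terms l, l)), p.1 ∈ PySem.List.pyRange M 0 (-1) := by
    intro p hp
    obtain ⟨l, hl, hpl⟩ := List.mem_map.mp hp
    have h0 : 0 < pvScore terms l := by
      have := (List.mem_filter.mp hl).2
      simpa using this
    have h1 := pvScore_le terms l
    rw [← hM] at h1
    rw [hss]
    exact List.mem_map.mpr ⟨(M - pvScore terms l).toNat, List.mem_range.mpr (by omega),
      by rw [← hpl]; omega⟩
  rw [sorted_eq_buckets (PySem.List.pyRange M 0 (-1)) hpair _ hmem, List.map_flatMap]
  apply List.flatMap_congr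
  intro s hsmem
  obtain ⟨hs1, hs2⟩ := hbounds s hsmem
  rw [getD_map_range' (M.toNat + 1) s.toNat _ (by omega), List.nil_append, List.filter_map,
    List.map_map]
  have hcomp : ((fun p : Int × String => decide (p.1 = s)) ∘ fun l => (pvScore terms l, l))
      = fun l => decide (pvScore terms l = s) := rfl
  rw [hcomp, List.filter_filter]
  rw [show (Prod.snd ∘ fun l : String => (pvScore terms l, l)) = id from rfl, List.map_id]
  apply List.filter_congr
  intro l _
  by_cases hp : 0 < pvScore terms l
  · simp only [decide_eq_true hp, Bool.and_true, Bool.true_and]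
    apply decide_eq_decide.mpr
    have := pvScore_nonneg terms l
    omega
  · simp [hp]
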